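-- pv_equiv track=rewrite | github.com/kkuzmina24/Lab09Sol | lab09SolV1.py | index_max_profit
-- ===== SOURCE A (Python) =====
-- def index_max_profit(init_list):
--     max = init_list[0][4]
--     index = 0
--
--     for line in range(len(init_list)):
--         if max <= init_list[line][4]:
--             max = init_list[line][4]
--             index = line
--
--     return index
-- ===== SOURCE B (Python) =====
-- def index_max_profit(init_list):
--     m = init_list[0][4]
--     for row in init_list:
--         if m < row[4]:
--             m = row[4]
--     index = 0
--     for i, row in enumerate(init_list):
--         if row[4] == m:
--             index = i
--     return index
-- ===== Notes on version B (the rewrite author's own statement) =====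
-- stated objective: alternative
-- what changed: Single index-loop tracking a (max, index) pair with <=-updates is replaced by two row-wise passes: one computing the column-4 maximum, one recording the last index whose column-4 value equals it.
import Mathlib
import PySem

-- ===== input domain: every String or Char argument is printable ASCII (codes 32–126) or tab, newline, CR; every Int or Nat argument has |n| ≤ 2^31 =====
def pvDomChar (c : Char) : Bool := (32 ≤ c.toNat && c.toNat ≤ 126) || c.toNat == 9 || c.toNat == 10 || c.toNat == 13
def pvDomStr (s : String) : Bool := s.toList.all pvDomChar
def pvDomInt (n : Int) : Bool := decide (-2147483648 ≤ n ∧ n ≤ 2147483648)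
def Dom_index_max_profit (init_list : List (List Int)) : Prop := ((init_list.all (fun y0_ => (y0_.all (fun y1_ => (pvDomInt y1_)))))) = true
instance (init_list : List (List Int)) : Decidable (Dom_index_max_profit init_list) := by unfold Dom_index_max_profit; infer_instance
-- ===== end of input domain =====

-- B replaces A's single indexed loop carrying a (max, index) pair by two row-wise passes
-- (compute the column-4 maximum, then record the last index attaining it); same cost, different decomposition.

-- ===== PORT A =====
-- A: max = init_list[0][4]; index = 0; for line in range(len): if max <= init_list[line][4]: max, index = ..., line
def index_max_profit (init_list : List (List Int)) : Int :=
  ((PySem.List.pyRange 0 (init_list.length : Int) 1).foldl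
    (fun (s : Int × Int) line =>
      if s.1 ≤ PySem.List.pyGetD (PySem.List.pyGetD init_list line []) 4 0 then
        (PySem.List.pyGetD (PySem.List.pyGetD init_list line []) 4 0, line)
      else s)
    (PySem.List.pyGetD (PySem.List.pyGetD init_list 0 []) 4 0, 0)).2

-- ===== PORT B =====
-- B: m = init_list[0][4]; strict-max pass over rows; then last-index-equal-to-m pass over enumerate
def pvBMax (init_list : List (List Int)) : Int :=
  init_list.foldl
    (fun m row => if m < PySem.List.pyGetD row 4 0 then PySem.List.pyGetD row 4 0 else m)
    (PySem.List.pyGetD (PySem.List.pyGetD init_list 0 []) 4 0)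

def index_max_profit_alt (init_list : List (List Int)) : Int :=
  (PySem.List.enumerate init_list 0).foldl
    (fun idx p => if PySem.List.pyGetD p.2 4 0 = pvBMax init_list then p.1 else idx) 0

-- ===== PRECONDITION & SPEC =====
-- Pre_ excludes exactly the inputs where Python A raises IndexError: the empty list and any row shorter than 5.
def Pre_index_max_profit (init_list : List (List Int)) : Prop :=
  init_list ≠ [] ∧ ∀ row ∈ init_list, 5 ≤ row.length
instance (init_list : List (List Int)) : Decidable (Pre_index_max_profit init_list) := by unfold Pre_index_max_profit; infer_instance
def pvWitness_index_max_profit : List (List Int) := [[0,0,0,0,1],[0,0,0,0,2]]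

def Spec_index_max_profit (init_list : List (List Int)) (out : Int) : Prop := out = index_max_profit_alt init_list
instance (init_list : List (List Int)) (out : Int) : Decidable (Spec_index_max_profit init_list out) := by unfold Spec_index_max_profit; infer_instance

-- ===== CLAIM (what is proved, stated in full; the proofs are below) =====
def Claim_equal_index_max_profit : Prop := ∀ (init_list : List (List Int)), Dom_index_max_profit init_list → Pre_index_max_profit init_list → Spec_index_max_profit init_list (index_max_profit init_list)

-- ===== LEMMAS AND PROOFS =====

-- column accessor shared by the reasoning
def pvCol (row : List Int) : Int := PySem.List.pyGetD row 4 0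

-- A's combined fold, B's two folds, over pairs (index, value)
def pvFA (ps : List (Int × Int)) (s : Int × Int) : Int × Int :=
  ps.foldl (fun s p => if s.1 ≤ p.2 then (p.2, p.1) else s) s
def pvFM (vs : List Int) (m : Int) : Int :=
  vs.foldl (fun m v => if m < v then v else m) m
def pvFI (ps : List (Int × Int)) (M j : Int) : Int :=
  ps.foldl (fun j p => if p.2 = M then p.1 else j) j

-- cons unfoldings of the three folds (definitional)
lemma pvFA_cons (p : Int × Int) (ps : List (Int × Int)) (s : Int × Int) :
    pvFA (p :: ps) s = pvFA ps (if s.1 ≤ p.2 then (p.2, p.1) else s) := rfl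
lemma pvFM_cons (v : Int) (vs : List Int) (m : Int) :
    pvFM (v :: vs) m = pvFM vs (if m < v then v else m) := rfl
lemma pvFI_cons (p : Int × Int) (ps : List (Int × Int)) (M j : Int) :
    pvFI (p :: ps) M j = pvFI ps M (if p.2 = M then p.1 else j) := rfl

lemma pvFM_le (vs : List Int) (m : Int) : m ≤ pvFM vs m := by
  induction vs generalizing m with
  | nil => simp [pvFM]
  | cons v vs ih =>
    simp only [pvFM, List.foldl_cons]
    split_ifs with h
    · exact le_trans (le_of_lt h) (ih v)
    · exact ih m

lemma pvFM_mem (vs : List Int) (m : Int) : pvFM vs m = m ∨ pvFM vs m ∈ vs := by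
  induction vs generalizing m with
  | nil => simp [pvFM]
  | cons v vs ih =>
    rw [pvFM_cons]
    rcases ih (if m < v then v else m) with h1 | h1
    · by_cases h : m < v
      · right; rw [h1, if_pos h]; exact List.mem_cons_self
      · left; rw [h1, if_neg h]
    · right; exact List.mem_cons_of_mem _ h1

lemma pvFI_seed (ps : List (Int × Int)) (M j j' : Int)
    (h : ∃ p ∈ ps, p.2 = M) : pvFI ps M j = pvFI ps M j' := by
  induction ps generalizing j j' with
  | nil => simp at h
  | cons p ps ih =>
    simp only [pvFI, List.foldl_cons]
    by_cases hp : p.2 = M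
    · simp [hp]
    · simp only [if_neg hp]
      rcases h with ⟨q, hq, hqM⟩
      rcases List.mem_cons.mp hq with rfl | hq
      · exact absurd hqM hp
      · exact ih j j' ⟨q, hq, hqM⟩

-- core: A's paired fold computes (max, last index equal to the max)
lemma pvFA_eq (ps : List (Int × Int)) (m j : Int) :
    pvFA ps (m, j) = (pvFM (ps.map (·.2)) m, pvFI ps (pvFM (ps.map (·.2)) m) j) := by
  induction ps generalizing m j with
  | nil => simp [pvFA, pvFM, pvFI]
  | cons p ps ih =>
    simp only [List.map_cons, pvFA_cons, pvFM_cons, pvFI_cons]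
    by_cases hle : m ≤ p.2
    · have hm' : (if m < p.2 then p.2 else m) = p.2 := by split_ifs <;> omega
      simp only [if_pos hle, hm']
      rw [ih]
      by_cases hM : p.2 = pvFM (ps.map (·.2)) p.2
      · rw [if_pos hM]
      · rw [if_neg hM]
        have hmem : pvFM (ps.map (·.2)) p.2 ∈ ps.map (·.2) := by
          rcases pvFM_mem (ps.map (·.2)) p.2 with h | h
          · exact absurd h.symm hM
          · exact h
        rcases List.mem_map.mp hmem with ⟨q, hq, hqM⟩
        exact congrArg _ (pvFI_seed ps _ p.1 j ⟨q, hq, hqM⟩)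
    · have hm' : (if m < p.2 then p.2 else m) = m := by split_ifs <;> omega
      simp only [if_neg hle, hm']
      rw [ih]
      have hne : p.2 ≠ pvFM (ps.map (·.2)) m := by
        have := pvFM_le (ps.map (·.2)) m; omega
      rw [if_neg hne]

-- enumerate of a snoc
lemma pvEnumAppend (l : List (List Int)) (x : List Int) (s : Int) :
    PySem.List.enumerate (l ++ [x]) s =
      PySem.List.enumerate l s ++ [(s + l.length, x)] := by
  induction l generalizing s with
  | nil => simp [PySem.List.enumerate_nil, PySem.List.enumerate_cons]
  | cons y ys ih =>
    simp [PySem.List.enumerate_cons, ih]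
    ring_nf

-- A's index loop over range(len) is the fold over enumerate
lemma pvRangeFold {σ : Type} (g : σ → Int → List Int → σ) (l : List (List Int)) (init : σ) :
    (PySem.List.pyRange 0 (l.length : Int) 1).foldl
        (fun s j => g s j (PySem.List.pyGetD l j [])) init
      = (PySem.List.enumerate l 0).foldl (fun s p => g s p.1 p.2) init := by
  induction l using List.reverseRecOn generalizing init with
  | nil => simp [PySem.List.pyRange_one_eq_nil, PySem.List.enumerate_nil]
  | append_singleton xs x ih =>
    have hlen : ((xs ++ [x]).length : Int) = (xs.length : Int) + 1 := by
      simp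
    rw [hlen, PySem.List.pyRange_one_succ_right (by positivity), List.foldl_append,
        pvEnumAppend, List.foldl_append]
    have hcongr :
        (PySem.List.pyRange 0 (xs.length : Int) 1).foldl
            (fun s j => g s j (PySem.List.pyGetD (xs ++ [x]) j [])) init
          = (PySem.List.pyRange 0 (xs.length : Int) 1).foldl
            (fun s j => g s j (PySem.List.pyGetD xs j [])) init := by
      apply PySem.List.foldl_congr_mem
      intro s j hj
      rcases (PySem.List.mem_pyRange_one).mp hj with ⟨h0, h1⟩
      have hlt : j < ((xs ++ [x]).length : Int) := by simp; omega
      rw [PySem.List.pyGetD_eq_getElem (xs ++ [x]) [] h0 hlt,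
          PySem.List.pyGetD_eq_getElem xs [] h0 h1,
          List.getElem_append_left]
    rw [hcongr, ih]
    simp only [List.foldl_cons, List.foldl_nil]
    have hx : PySem.List.pyGetD (xs ++ [x]) (xs.length : Int) [] = x := by
      rw [PySem.List.pyGetD_eq_getElem (xs ++ [x]) [] (by positivity) (by simp)]
      simp
    rw [hx, zero_add]

-- A's loop body over enumerate, re-expressed on the column-mapped pairs
lemma pvAenum (l : List (List Int)) (s : Int) (init : Int × Int) :
    (PySem.List.enumerate l s).foldl
        (fun (st : Int × Int) p =>
          if st.1 ≤ PySem.List.pyGetD p.2 4 0 then (PySem.List.pyGetD p.2 4 0, p.1) else st)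
        init
      = pvFA (PySem.List.enumerate (l.map pvCol) s) init := by
  induction l generalizing s init with
  | nil => simp [PySem.List.enumerate_nil, pvFA]
  | cons x xs ih =>
    simp only [PySem.List.enumerate_cons, List.map_cons, List.foldl_cons, pvFA_cons, pvCol]
    exact ih (s + 1) _

-- B's max loop over rows, re-expressed on the column values
lemma pvMfold (l : List (List Int)) (m : Int) :
    l.foldl (fun m row =>
        if m < PySem.List.pyGetD row 4 0 then PySem.List.pyGetD row 4 0 else m) m
      = pvFM (l.map pvCol) m := by
  induction l generalizing m with
  | nil => simp [pvFM]
  | cons x xs ih =>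
    simp only [List.map_cons, List.foldl_cons, pvFM_cons, pvCol]
    exact ih _

-- B's index loop over enumerate, re-expressed on the column-mapped pairs
lemma pvIenum (l : List (List Int)) (s M j : Int) :
    (PySem.List.enumerate l s).foldl
        (fun idx p => if PySem.List.pyGetD p.2 4 0 = M then p.1 else idx) j
      = pvFI (PySem.List.enumerate (l.map pvCol) s) M j := by
  induction l generalizing s j with
  | nil => simp [PySem.List.enumerate_nil, pvFI]
  | cons x xs ih =>
    simp only [PySem.List.enumerate_cons, List.map_cons, List.foldl_cons, pvFI_cons, pvCol]
    exact ih (s + 1) _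

-- unfold A to the generic folds
lemma pvA_eq (l : List (List Int)) :
    index_max_profit l =
      (pvFA (PySem.List.enumerate (l.map pvCol) 0)
        (pvCol (PySem.List.pyGetD l 0 []), 0)).2 :=
  congrArg Prod.snd
    ((pvRangeFold
        (fun (s : Int × Int) j row =>
          if s.1 ≤ PySem.List.pyGetD row 4 0 then (PySem.List.pyGetD row 4 0, j) else s)
        l _).trans (pvAenum l 0 _))

-- unfold B to the generic folds
lemma pvB_eq (l : List (List Int)) :
    index_max_profit_alt l =
      pvFI (PySem.List.enumerate (l.map pvCol) 0)
        (pvFM (l.map pvCol) (pvCol (PySem.List.pyGetD l 0 []))) 0 :=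
  (pvIenum l 0 (pvBMax l) 0).trans
    (congrArg (fun M => pvFI (PySem.List.enumerate (l.map pvCol) 0) M 0)
      (pvMfold l (pvCol (PySem.List.pyGetD l 0 []))))

-- ===== VERDICT (by name: the statement is the Claim_ definition above) =====
theorem index_max_profit_spec : Claim_equal_index_max_profit := by
  intro l _ _
  unfold Spec_index_max_profit
  rw [pvA_eq, pvB_eq, pvFA_eq, PySem.List.map_snd_enumerate]
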